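-- pv_equiv track=rewrite | github.com/IngvarConsulting/efd_unpacker | src/efd_unpacker/runtime.py | _remove_legacy_profile_block
-- ===== SOURCE A (Python) =====
-- CLI_LAUNCHER_MARKER = "# Managed by EFD Unpacker"
--
-- def _remove_legacy_profile_block(profile_text: str) -> str:
--     lines = profile_text.splitlines(keepends=True)
--     cleaned_lines: list[str] = []
--     index = 0
--
--     while index < len(lines):
--         line = lines[index]
--         if line.strip() == CLI_LAUNCHER_MARKER:
--             next_line = lines[index + 1] if index + 1 < len(lines) else ""
--             if next_line.lstrip().startswith('export PATH="$PATH:'):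
--                 index += 2
--                 continue
--         cleaned_lines.append(line)
--         index += 1
--
--     return "".join(cleaned_lines).lstrip("\n")
-- ===== SOURCE B (Python) =====
-- CLI_LAUNCHER_MARKER = "# Managed by EFD Unpacker"
--
-- def _remove_legacy_profile_block(profile_text: str) -> str:
--     out: list[str] = []
--     pending = None  # a marker line waiting to see whether an export line follows
--     for line in profile_text.splitlines(keepends=True):
--         if pending is not None:
--             if line.lstrip().startswith('export PATH="$PATH:'):
--                 pending = None
--                 continue
--             out.append(pending)
--             pending = None
--         if line.strip() == CLI_LAUNCHER_MARKER:
--             pending = line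
--         else:
--             out.append(line)
--     if pending is not None:
--         out.append(pending)
--     return "".join(out).lstrip("\n")
-- ===== Notes on version B (the rewrite author's own statement) =====
-- stated objective: alternative
-- what changed: Replaces the index-based while loop with a next-line peek (lines[index+1]) by a single streaming pass that buffers a pending marker line and decides on it when the following line arrives (look-behind buffer instead of look-ahead index arithmetic).
import Mathlib
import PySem

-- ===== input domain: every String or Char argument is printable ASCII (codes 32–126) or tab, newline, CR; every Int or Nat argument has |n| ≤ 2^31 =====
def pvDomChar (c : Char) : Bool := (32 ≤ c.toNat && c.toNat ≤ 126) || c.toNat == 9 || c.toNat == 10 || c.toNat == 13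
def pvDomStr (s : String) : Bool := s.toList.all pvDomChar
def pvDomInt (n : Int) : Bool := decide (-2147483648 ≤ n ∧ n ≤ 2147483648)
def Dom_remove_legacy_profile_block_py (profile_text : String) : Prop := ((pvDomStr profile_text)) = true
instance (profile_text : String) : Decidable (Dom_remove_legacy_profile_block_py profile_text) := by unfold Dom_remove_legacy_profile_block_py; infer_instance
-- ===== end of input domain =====

-- B replaces A's index-based while loop with a next-line peek by a streaming pass that
-- buffers a pending marker line (look-behind instead of look-ahead); same output.

-- shared helpers (both Pythons evaluate these same expressions)
-- splitlines(keepends=True), exact on Dom: the only line breaks there are '\n', '\r', '\r\n'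
def pvLinesKeep : List Char → List (List Char)
  | [] => []
  | c :: rest =>
    if c == '\n' then [c] :: pvLinesKeep rest
    else if c == '\r' then
      match rest with
      | d :: rest' =>
        if d == '\n' then ['\r', '\n'] :: pvLinesKeep rest'
        else [c] :: pvLinesKeep (d :: rest')
      | [] => [[c]]
    else
      match pvLinesKeep rest with
      | [] => [[c]]
      | l :: ls => (c :: l) :: ls
  termination_by cs => cs.length
  decreasing_by all_goals (simp; try omega)

-- line.strip() == CLI_LAUNCHER_MARKER
def pvMarkerLine (line : List Char) : Bool :=
  PySem.Chars.strip line == "# Managed by EFD Unpacker".toList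

-- line.lstrip().startswith('export PATH="$PATH:')
def pvExportLine (line : List Char) : Bool :=
  PySem.Chars.startswith (PySem.Chars.lstrip line) "export PATH=\"$PATH:".toList

-- ===== PORT A =====
-- A's while loop over the line list: peek at lines[index+1] ("" if absent); index += 2 = drop 1 of the tail
def pvLoopA : List (List Char) → List (List Char)
  | [] => []
  | line :: rest =>
    if pvMarkerLine line then
      if pvExportLine (rest.headD []) then pvLoopA (rest.drop 1)
      else line :: pvLoopA rest
    else line :: pvLoopA rest
  termination_by xs => xs.length
  decreasing_by all_goals simp

-- "".join(cleaned).lstrip("\n")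
def remove_legacy_profile_block_py (profile_text : String) : String :=
  String.ofList ((PySem.Chars.join [] (pvLoopA (pvLinesKeep profile_text.toList))).dropWhile (· == '\n'))

-- ===== PORT B =====
-- B's streaming pass: `pending` holds a marker line awaiting the next line; flushed or dropped then
def pvLoopB : List (List Char) → Option (List Char) → List (List Char)
  | [], pending => pending.toList
  | line :: rest, some p =>
    if pvExportLine line then pvLoopB rest none
    else p :: (if pvMarkerLine line then pvLoopB rest (some line) else line :: pvLoopB rest none)
  | line :: rest, none =>
    if pvMarkerLine line then pvLoopB rest (some line) else line :: pvLoopB rest none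

def remove_legacy_profile_block_py_alt (profile_text : String) : String :=
  String.ofList ((PySem.Chars.join [] (pvLoopB (pvLinesKeep profile_text.toList) none)).dropWhile (· == '\n'))

-- ===== PRECONDITION & SPEC =====
def Spec_remove_legacy_profile_block_py (profile_text : String) (out : String) : Prop := out = remove_legacy_profile_block_py_alt profile_text
instance (profile_text : String) (out : String) : Decidable (Spec_remove_legacy_profile_block_py profile_text out) := by unfold Spec_remove_legacy_profile_block_py; infer_instance

-- ===== CLAIM (what is proved, stated in full; the proofs are below) =====
def Claim_equal_remove_legacy_profile_block_py : Prop := ∀ (profile_text : String), Dom_remove_legacy_profile_block_py profile_text → Spec_remove_legacy_profile_block_py profile_text (remove_legacy_profile_block_py profile_text)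

-- ===== LEMMAS AND PROOFS =====
lemma pvExportLine_nil : pvExportLine [] = false := by decide

lemma pvLoopB_eq (lines : List (List Char)) :
    pvLoopB lines none = pvLoopA lines ∧
    ∀ p, pvMarkerLine p = true → pvLoopB lines (some p) = pvLoopA (p :: lines) := by
  induction lines with
  | nil =>
    refine ⟨by simp [pvLoopA, pvLoopB], fun p hp => ?_⟩
    simp [pvLoopB, pvLoopA, hp, pvExportLine_nil]
  | cons line rest ih =>
    constructor
    · by_cases hm : pvMarkerLine line = true
      · rw [show pvLoopB (line :: rest) none = pvLoopB rest (some line) by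
          simp [pvLoopB, hm]]
        exact ih.2 line hm
      · simp only [Bool.not_eq_true] at hm
        simp [pvLoopB, pvLoopA, hm, ih.1]
    · intro p hp
      by_cases he : pvExportLine line = true
      · simp [pvLoopB, pvLoopA, hp, he, ih.1]
      · simp only [Bool.not_eq_true] at he
        by_cases hm : pvMarkerLine line = true
        · have h2 := ih.2 line hm
          simp [pvLoopB, pvLoopA, hp, he, hm, h2]
        · simp only [Bool.not_eq_true] at hm
          simp [pvLoopB, pvLoopA, hp, he, hm, ih.1]

-- ===== VERDICT (by name: the statement is the Claim_ definition above) =====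
theorem remove_legacy_profile_block_py_spec : Claim_equal_remove_legacy_profile_block_py := by
  intro profile_text _
  unfold Spec_remove_legacy_profile_block_py
  unfold remove_legacy_profile_block_py remove_legacy_profile_block_py_alt
  rw [(pvLoopB_eq (pvLinesKeep profile_text.toList)).1]
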